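-- pv_equiv track=rewrite | github.com/1274085042/Algorithm | Offer/HUAWEI/学英语.py | Solution
-- ===== SOURCE A (Python) =====
-- def Solution(n):
--     dic1=[ 'one','two','three','four','five','six','seven','eight','nine','ten','eleven','twelve','thirteen','fourteen','fifteen','sixteen','seventeen','eighteen','nineteen']
--     dic2=['twenty','thirty','forty','fifty','sixty','seventy','eighty','ninety']
--     dic3 = ['thousand','million']
--     res=[]
--     n=str(n)
--     if len(n)>9 or int(n)<0:
--         return "error"
--     elif int(n)==0:
--             return ''
--     else:
--         n=int(n)
--         if n<20:
--             return dic1[n-1]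
--         elif n<100:
--             return dic2[n//10-2]+' '+Solution(n%10)
--         elif n<1000:
--             tem=Solution(n%100)
--             if tem!='':
--                 return Solution(n//100)+' hundred and '+tem
--             else:
--                 return Solution(n//100)+' hundred'
--         else:
--
--             if n<1000000:
--                 return Solution(n//1000)+' thousand '+Solution(n%1000)
--             else:
--                 return Solution(n//1000000)+' million '+Solution(n%1000000)
-- ===== SOURCE B (Python) =====
-- D1 = ['one','two','three','four','five','six','seven','eight','nine','ten','eleven','twelve','thirteen','fourteen','fifteen','sixteen','seventeen','eighteen','nineteen']
-- D2 = ['twenty','thirty','forty','fifty','sixty','seventy','eighty','ninety']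
--
-- def two(x):
--     if x == 0:
--         return ''
--     if x < 20:
--         return D1[x - 1]
--     s = D2[x // 10 - 2] + ' '
--     return s + (D1[x % 10 - 1] if x % 10 else '')
--
-- def three(x):
--     h, r = divmod(x, 100)
--     low = two(r)
--     if h == 0:
--         return low
--     if low:
--         return D1[h - 1] + ' hundred and ' + low
--     return D1[h - 1] + ' hundred'
--
-- def Solution(n):
--     if n < 0 or n > 999999999:
--         return "error"
--     if n == 0:
--         return ''
--     m, r = divmod(n, 1000000)
--     t, u = divmod(r, 1000)
--     s = ''
--     if m:
--         s += three(m) + ' million '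
--     if t:
--         s += three(t) + ' thousand '
--     return s + three(u)
-- ===== Notes on version B (the rewrite author's own statement) =====
-- stated objective: simpler
-- what changed: A converts n to a string and recurses on itself through six branches for every scale; B uses non-recursive table helpers two/three for 0..999 and assembles the millions/thousands/units groups in one flat pass with plain integer bounds checks.
import Mathlib
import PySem

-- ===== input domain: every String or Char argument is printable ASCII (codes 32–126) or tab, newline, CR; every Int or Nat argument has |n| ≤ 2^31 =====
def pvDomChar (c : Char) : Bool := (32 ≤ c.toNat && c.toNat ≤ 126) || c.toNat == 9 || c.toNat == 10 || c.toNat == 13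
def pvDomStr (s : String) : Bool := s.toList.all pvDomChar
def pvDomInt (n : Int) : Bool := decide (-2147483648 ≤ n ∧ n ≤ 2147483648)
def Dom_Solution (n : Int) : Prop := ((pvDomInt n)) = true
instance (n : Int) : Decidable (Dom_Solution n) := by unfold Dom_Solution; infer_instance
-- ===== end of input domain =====

-- B replaces A's six-way self-recursion by non-recursive table helpers (twoW/threeW) plus a flat
-- millions/thousands/units group assembly: same return value, different decomposition (objective: simpler).

-- ===== PORT A =====
def dic1 : List String := ["one","two","three","four","five","six","seven","eight","nine","ten","eleven","twelve","thirteen","fourteen","fifteen","sixteen","seventeen","eighteen","nineteen"]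
def dic2 : List String := ["twenty","thirty","forty","fifty","sixty","seventy","eighty","ninety"]

-- literal port of A; `int(str(n))` round-trips to `n` itself (exact), the length guard reads
-- len(str(n)) through PySem.Str.len/PySem.Int.toStr (exact).
def Solution (n : Int) : String :=
  if _h0 : 9 < PySem.Str.len (PySem.Int.toStr n) ∨ n < 0 then "error"
  else if _h1 : n = 0 then ""
  else if _h2 : n < 20 then PySem.List.pyGetD dic1 (n - 1) ""
  else if _h3 : n < 100 then
    PySem.List.pyGetD dic2 (PySem.Int.floordiv n 10 - 2) "" ++ " " ++ Solution (PySem.Int.mod n 10)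
  else if _h4 : n < 1000 then
    let tem := Solution (PySem.Int.mod n 100)
    if tem ≠ "" then Solution (PySem.Int.floordiv n 100) ++ " hundred and " ++ tem
    else Solution (PySem.Int.floordiv n 100) ++ " hundred"
  else if _h5 : n < 1000000 then
    Solution (PySem.Int.floordiv n 1000) ++ " thousand " ++ Solution (PySem.Int.mod n 1000)
  else
    Solution (PySem.Int.floordiv n 1000000) ++ " million " ++ Solution (PySem.Int.mod n 1000000)
termination_by n.toNat
decreasing_by
  · rw [PySem.Int.mod_eq_emod_of_pos (by norm_num)]; omega
  · rw [PySem.Int.mod_eq_emod_of_pos (by norm_num)]; omega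
  · rw [PySem.Int.floordiv_eq_ediv_of_pos (by norm_num)]; omega
  · rw [PySem.Int.floordiv_eq_ediv_of_pos (by norm_num)]; omega
  · rw [PySem.Int.floordiv_eq_ediv_of_pos (by norm_num)]; omega
  · rw [PySem.Int.mod_eq_emod_of_pos (by norm_num)]; omega
  · rw [PySem.Int.floordiv_eq_ediv_of_pos (by norm_num)]; omega
  · rw [PySem.Int.mod_eq_emod_of_pos (by norm_num)]; omega

-- ===== PORT B =====
def oneW : List String := ["one","two","three","four","five","six","seven","eight","nine","ten","eleven","twelve","thirteen","fourteen","fifteen","sixteen","seventeen","eighteen","nineteen"]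
def tensW : List String := ["twenty","thirty","forty","fifty","sixty","seventy","eighty","ninety"]

def twoW (x : Int) : String :=
  if x = 0 then ""
  else if x < 20 then PySem.List.pyGetD oneW (x - 1) ""
  else
    let s := PySem.List.pyGetD tensW (PySem.Int.floordiv x 10 - 2) "" ++ " "
    s ++ (if PySem.Int.mod x 10 ≠ 0 then PySem.List.pyGetD oneW (PySem.Int.mod x 10 - 1) "" else "")

def threeW (x : Int) : String :=
  let h := PySem.Int.floordiv x 100
  let low := twoW (PySem.Int.mod x 100)
  if h = 0 then low
  else if low ≠ "" then PySem.List.pyGetD oneW (h - 1) "" ++ " hundred and " ++ low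
  else PySem.List.pyGetD oneW (h - 1) "" ++ " hundred"

def Solution_alt (n : Int) : String :=
  if n < 0 ∨ 999999999 < n then "error"
  else if n = 0 then ""
  else
    let m := PySem.Int.floordiv n 1000000
    let r := PySem.Int.mod n 1000000
    let t := PySem.Int.floordiv r 1000
    let u := PySem.Int.mod r 1000
    let s : String := ""
    let s := if m ≠ 0 then s ++ (threeW m ++ " million ") else s
    let s := if t ≠ 0 then s ++ (threeW t ++ " thousand ") else s
    s ++ threeW u

-- ===== PRECONDITION & SPEC =====
def Spec_Solution (n : Int) (out : String) : Prop := out = Solution_alt n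
instance (n : Int) (out : String) : Decidable (Spec_Solution n out) := by unfold Spec_Solution; infer_instance

-- ===== CLAIM (what is proved, stated in full; the proofs are below) =====
def Claim_equal_Solution : Prop := ∀ (n : Int), Dom_Solution n → Spec_Solution n (Solution n)

-- ===== LEMMAS AND PROOFS =====

-- 10^e ≤ n forces at least e+1 digit characters (lower-bound companion of Nat.toDigits_length)
lemma toDigitsCore_len_ge : ∀ (f n e : Nat), n < f → 10 ^ e ≤ n →
    e + 1 ≤ (Nat.toDigitsCore 10 f n []).length := by
  intro f
  induction f with
  | zero => intro n e h _; omega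
  | succ f ih =>
    intro n e hnf hle
    cases e with
    | zero =>
      simp only [Nat.toDigitsCore]
      split_ifs with h
      · simp
      · rw [Nat.toDigitsCore_lens_eq]; omega
    | succ e =>
      have h10 : 10 ≤ n := le_trans (by have := Nat.one_le_pow e 10 (by norm_num); omega) hle
      have hdiv : 10 ^ e ≤ n / 10 := by
        rw [Nat.le_div_iff_mul_le (by norm_num)]
        calc 10 ^ e * 10 = 10 ^ (e + 1) := by ring
          _ ≤ n := hle
      have hne : ¬ (n / 10 = 0) := by
        have : 1 ≤ 10 ^ e := Nat.one_le_pow e 10 (by norm_num)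
        omega
      simp only [Nat.toDigitsCore, hne, if_false]
      rw [Nat.toDigitsCore_lens_eq]
      have hlt : n / 10 < f := by omega
      have := ih (n / 10) e hlt hdiv
      omega

lemma guard_le (n : Int) (h0 : 0 ≤ n) (h9 : n ≤ 999999999) :
    ¬ (9 < PySem.Str.len (PySem.Int.toStr n) ∨ n < 0) := by
  push Not
  refine ⟨?_, h0⟩
  rw [PySem.Str.len_eq, PySem.Int.toList_toStr, PySem.Int.toChars, if_neg (by omega)]
  have := Nat.toDigits_length 10 n.toNat 9 (by norm_num) (by omega)
  exact_mod_cast this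

lemma guard_gt (n : Int) (h : 999999999 < n) :
    9 < PySem.Str.len (PySem.Int.toStr n) := by
  rw [PySem.Str.len_eq, PySem.Int.toList_toStr, PySem.Int.toChars, if_neg (by omega)]
  have hlt : n.toNat < n.toNat + 1 := by omega
  have := toDigitsCore_len_ge (n.toNat + 1) n.toNat 9 hlt (by omega)
  rw [Nat.toDigits]
  exact_mod_cast by omega

lemma sol_err_neg (n : Int) (h : n < 0) : Solution n = "error" := by
  rw [Solution, dif_pos (Or.inr h)]

lemma sol_err_big (n : Int) (h : 999999999 < n) : Solution n = "error" := by
  rw [Solution, dif_pos (Or.inl (guard_gt n h))]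

lemma sol_zero : Solution 0 = "" := by
  rw [Solution, dif_neg (guard_le 0 (by norm_num) (by norm_num)), dif_pos rfl]

lemma sol_1_19 (n : Int) (h1 : 1 ≤ n) (h2 : n ≤ 19) :
    Solution n = PySem.List.pyGetD dic1 (n - 1) "" := by
  rw [Solution, dif_neg (guard_le n (by omega) (by omega)), dif_neg (by omega : ¬ n = 0),
    dif_pos (by omega : n < 20)]

lemma sol_20_99 (n : Int) (h1 : 20 ≤ n) (h2 : n ≤ 99) :
    Solution n = PySem.List.pyGetD dic2 (PySem.Int.floordiv n 10 - 2) "" ++ " " ++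
      Solution (PySem.Int.mod n 10) := by
  rw [Solution, dif_neg (guard_le n (by omega) (by omega)), dif_neg (by omega : ¬ n = 0),
    dif_neg (by omega : ¬ n < 20), dif_pos (by omega : n < 100)]

lemma sol_100_999 (n : Int) (h1 : 100 ≤ n) (h2 : n ≤ 999) :
    Solution n =
      (let tem := Solution (PySem.Int.mod n 100);
       if tem ≠ "" then Solution (PySem.Int.floordiv n 100) ++ " hundred and " ++ tem
       else Solution (PySem.Int.floordiv n 100) ++ " hundred") := by
  rw [Solution, dif_neg (guard_le n (by omega) (by omega)), dif_neg (by omega : ¬ n = 0),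
    dif_neg (by omega : ¬ n < 20), dif_neg (by omega : ¬ n < 100), dif_pos (by omega : n < 1000)]

lemma sol_thousand (n : Int) (h1 : 1000 ≤ n) (h2 : n ≤ 999999) :
    Solution n = Solution (PySem.Int.floordiv n 1000) ++ " thousand " ++
      Solution (PySem.Int.mod n 1000) := by
  rw [Solution, dif_neg (guard_le n (by omega) (by omega)), dif_neg (by omega : ¬ n = 0),
    dif_neg (by omega : ¬ n < 20), dif_neg (by omega : ¬ n < 100),
    dif_neg (by omega : ¬ n < 1000), dif_pos (by omega : n < 1000000)]

lemma sol_million (n : Int) (h1 : 1000000 ≤ n) (h2 : n ≤ 999999999) :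
    Solution n = Solution (PySem.Int.floordiv n 1000000) ++ " million " ++
      Solution (PySem.Int.mod n 1000000) := by
  rw [Solution, dif_neg (guard_le n (by omega) (by omega)), dif_neg (by omega : ¬ n = 0),
    dif_neg (by omega : ¬ n < 20), dif_neg (by omega : ¬ n < 100),
    dif_neg (by omega : ¬ n < 1000), dif_neg (by omega : ¬ n < 1000000)]

-- Solution agrees with B's two-digit helper on 0..99
lemma sol_twoW (x : Int) (h0 : 0 ≤ x) (h9 : x ≤ 99) : Solution x = twoW x := by
  by_cases hz : x = 0
  · subst hz; rw [sol_zero]; simp [twoW]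
  · by_cases h20 : x < 20
    · rw [sol_1_19 x (by omega) (by omega)]
      simp [twoW, hz, h20, dic1, oneW]
    · rw [sol_20_99 x (by omega) (by omega)]
      have hdd : PySem.Int.mod x 10 = x % 10 := PySem.Int.mod_eq_emod_of_pos (by norm_num)
      have hd0 : 0 ≤ PySem.Int.mod x 10 := by omega
      have hd9 : PySem.Int.mod x 10 < 10 := by omega
      rw [twoW, if_neg hz, if_neg h20]
      show _ = PySem.List.pyGetD tensW _ "" ++ " " ++ _
      rw [show tensW = dic2 from rfl]
      congr 1
      by_cases hdz : PySem.Int.mod x 10 = 0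
      · rw [hdz, sol_zero, if_neg (by simp)]
      · rw [sol_1_19 _ (by omega) (by omega), if_pos hdz, show oneW = dic1 from rfl]

-- Solution agrees with B's three-digit helper on 0..999
lemma sol_threeW (x : Int) (h0 : 0 ≤ x) (h9 : x ≤ 999) : Solution x = threeW x := by
  have hfd : PySem.Int.floordiv x 100 = x / 100 := PySem.Int.floordiv_eq_ediv_of_pos (by norm_num)
  have hmd : PySem.Int.mod x 100 = x % 100 := PySem.Int.mod_eq_emod_of_pos (by norm_num)
  by_cases hsmall : x ≤ 99
  · have h1 : PySem.Int.floordiv x 100 = 0 := by omega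
    have h2 : PySem.Int.mod x 100 = x := by omega
    rw [threeW]
    simp only [h1, h2]
    exact sol_twoW x h0 hsmall
  · have hh1 : 1 ≤ PySem.Int.floordiv x 100 := by omega
    have hh9 : PySem.Int.floordiv x 100 ≤ 9 := by omega
    have hr0 : 0 ≤ PySem.Int.mod x 100 := by omega
    have hr9 : PySem.Int.mod x 100 ≤ 99 := by omega
    rw [sol_100_999 x (by omega) (by omega)]
    rw [threeW]
    simp only [if_neg (by omega : ¬ PySem.Int.floordiv x 100 = 0)]
    rw [← sol_twoW _ hr0 hr9, sol_1_19 _ hh1 (by omega), show oneW = dic1 from rfl]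

theorem Solution_spec : Claim_equal_Solution := by
  intro n _
  unfold Spec_Solution
  by_cases hneg : n < 0
  · rw [sol_err_neg n hneg, Solution_alt, if_pos (Or.inl hneg)]
  · by_cases hbig : 999999999 < n
    · rw [sol_err_big n hbig, Solution_alt, if_pos (Or.inr hbig)]
    · by_cases hz : n = 0
      · subst hz; rw [sol_zero, Solution_alt, if_neg (by omega), if_pos rfl]
      · rw [Solution_alt, if_neg (by omega), if_neg hz]
        have hM : PySem.Int.floordiv n 1000000 = n / 1000000 :=
          PySem.Int.floordiv_eq_ediv_of_pos (by norm_num)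
        have hR : PySem.Int.mod n 1000000 = n % 1000000 :=
          PySem.Int.mod_eq_emod_of_pos (by norm_num)
        have hT : PySem.Int.floordiv (PySem.Int.mod n 1000000) 1000 =
            (n % 1000000) / 1000 := by
          rw [hR]; exact PySem.Int.floordiv_eq_ediv_of_pos (by norm_num)
        have hU : PySem.Int.mod (PySem.Int.mod n 1000000) 1000 = (n % 1000000) % 1000 := by
          rw [hR]; exact PySem.Int.mod_eq_emod_of_pos (by norm_num)
        by_cases hs : n ≤ 999
        · -- one group: the units
          have hm0 : PySem.Int.floordiv n 1000000 = 0 := by omega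
          have ht0 : PySem.Int.floordiv (PySem.Int.mod n 1000000) 1000 = 0 := by omega
          have hu : PySem.Int.mod (PySem.Int.mod n 1000000) 1000 = n := by omega
          simp only [hm0, ht0, hu, ne_eq, not_true_eq_false, if_false]
          rw [← sol_threeW n (by omega) hs, String.empty_append]
        · by_cases hth : n ≤ 999999
          · -- thousand group, no millions
            have hm0 : PySem.Int.floordiv n 1000000 = 0 := by omega
            have hrn : PySem.Int.mod n 1000000 = n := by omega
            simp only [hm0, hrn, ne_eq, not_true_eq_false, if_false]
            have hfd : PySem.Int.floordiv n 1000 = n / 1000 :=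
              PySem.Int.floordiv_eq_ediv_of_pos (by norm_num)
            have hmd : PySem.Int.mod n 1000 = n % 1000 :=
              PySem.Int.mod_eq_emod_of_pos (by norm_num)
            rw [sol_thousand n (by omega) (by omega)]
            rw [if_pos (by omega : PySem.Int.floordiv n 1000 ≠ 0)]
            rw [sol_threeW (PySem.Int.floordiv n 1000) (by omega) (by omega),
              sol_threeW (PySem.Int.mod n 1000) (by omega) (by omega), String.empty_append]
          · -- millions
            have hm1 : 1 ≤ PySem.Int.floordiv n 1000000 := by omega
            have hm9 : PySem.Int.floordiv n 1000000 ≤ 999 := by omega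
            have hr0 : 0 ≤ PySem.Int.mod n 1000000 := by omega
            have hr9 : PySem.Int.mod n 1000000 ≤ 999999 := by omega
            rw [sol_million n (by omega) (by omega)]
            dsimp only
            rw [if_pos (by omega : PySem.Int.floordiv n 1000000 ≠ 0)]
            rw [sol_threeW (PySem.Int.floordiv n 1000000) (by omega) hm9, String.empty_append]
            by_cases hrs : PySem.Int.mod n 1000000 ≤ 999
            · have ht0 : PySem.Int.floordiv (PySem.Int.mod n 1000000) 1000 = 0 := by omega
              have hu : PySem.Int.mod (PySem.Int.mod n 1000000) 1000 =
                  PySem.Int.mod n 1000000 := by omega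
              simp only [ht0, hu, ne_eq, not_true_eq_false, if_false]
              rw [sol_threeW (PySem.Int.mod n 1000000) hr0 hrs]
            · rw [sol_thousand (PySem.Int.mod n 1000000) (by omega) (by omega)]
              rw [if_pos (by omega :
                PySem.Int.floordiv (PySem.Int.mod n 1000000) 1000 ≠ 0)]
              have hfd2 : PySem.Int.floordiv (PySem.Int.mod n 1000000) 1000 =
                  (n % 1000000) / 1000 := hT
              rw [sol_threeW (PySem.Int.floordiv (PySem.Int.mod n 1000000) 1000)
                  (by omega) (by omega),
                sol_threeW (PySem.Int.mod (PySem.Int.mod n 1000000) 1000)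
                  (by omega) (by omega)]
              simp only [String.append_assoc]
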